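-- pv_equiv track=rewrite | github.com/oelemento/federated-ehr-fm | src/evaluate_conditions.py | resolve_codeset
-- ===== SOURCE A (Python) =====
-- def resolve_codeset(vocab: dict[str, int], prefixes: list[str]) -> list[int]:
--     """Return the sorted list of vocab token ids whose string starts with any prefix."""
--     hits = []
--     for tok, tid in vocab.items():
--         for p in prefixes:
--             if tok.startswith(p):
--                 hits.append(tid)
--                 break
--     return sorted(hits)
-- ===== SOURCE B (Python) =====
-- def resolve_codeset(vocab: dict[str, int], prefixes: list[str]) -> list[int]:
--     """Return the sorted list of vocab token ids whose string starts with any prefix."""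
--     pset = set(prefixes)
--     lengths = {len(p) for p in prefixes}
--     hits = [tid for tok, tid in vocab.items()
--             if any(tok[:L] in pset for L in lengths)]
--     return sorted(hits)
-- ===== Notes on version B (the rewrite author's own statement) =====
-- stated objective: faster
-- what changed: Replaces the per-token scan over all prefixes (repeated startswith) by a precomputed hash set of prefixes plus the set of distinct prefix lengths: each token is tested by slicing it at each distinct length and looking the slice up in the set, so per-token cost depends on the number of distinct prefix lengths, not the number of prefixes.
import Mathlib
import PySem

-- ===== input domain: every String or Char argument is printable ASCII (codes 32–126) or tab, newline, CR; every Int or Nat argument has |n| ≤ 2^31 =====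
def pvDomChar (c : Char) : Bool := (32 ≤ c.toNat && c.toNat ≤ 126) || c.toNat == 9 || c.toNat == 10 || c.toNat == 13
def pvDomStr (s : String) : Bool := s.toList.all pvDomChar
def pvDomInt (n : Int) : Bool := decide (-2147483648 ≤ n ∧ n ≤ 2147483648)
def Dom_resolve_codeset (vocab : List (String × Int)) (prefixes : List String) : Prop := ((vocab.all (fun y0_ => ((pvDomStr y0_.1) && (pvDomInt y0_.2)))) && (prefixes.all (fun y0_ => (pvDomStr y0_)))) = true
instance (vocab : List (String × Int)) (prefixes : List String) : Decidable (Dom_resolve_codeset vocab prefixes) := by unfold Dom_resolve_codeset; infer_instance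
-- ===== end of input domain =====

-- B replaces A's per-token scan over all prefixes by one hash set of prefixes plus the set of
-- distinct prefix lengths, testing each token by slicing at each distinct length (faster).

-- ===== PORT A =====
-- inner 'for p in prefixes: if tok.startswith(p): append; break'
def pvFirstMatchA (tok : String) : List String → Bool
  | [] => false
  | p :: ps => if PySem.Str.startswith tok p then true else pvFirstMatchA tok ps

def resolve_codeset (vocab : List (String × Int)) (prefixes : List String) : List Int :=
  PySem.List.sorted
    (vocab.foldl (fun hits x => if pvFirstMatchA x.1 prefixes then hits ++ [x.2] else hits) [])
    (fun x => x) false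

-- ===== PORT B =====
-- any(tok[:L] in pset for L in lengths)
def pvMatchB (pset : PySem.Set String) (lengths : PySem.Set Int) (tok : String) : Bool :=
  lengths.any (fun L => pset.contains (PySem.Str.slice tok none (some L)))

def resolve_codeset_alt (vocab : List (String × Int)) (prefixes : List String) : List Int :=
  let pset : PySem.Set String := PySem.Set.ofList prefixes
  let lengths : PySem.Set Int := PySem.Set.ofList (prefixes.map PySem.Str.len)
  PySem.List.sorted
    ((vocab.filter (fun x => pvMatchB pset lengths x.1)).map (fun x => x.2))
    (fun x => x) false

-- ===== PRECONDITION & SPEC =====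
def Spec_resolve_codeset (vocab : List (String × Int)) (prefixes : List String) (out : List Int) : Prop := out = resolve_codeset_alt vocab prefixes
instance (vocab : List (String × Int)) (prefixes : List String) (out : List Int) : Decidable (Spec_resolve_codeset vocab prefixes out) := by unfold Spec_resolve_codeset; infer_instance

-- ===== CLAIM (what is proved, stated in full; the proofs are below) =====
def Claim_equal_resolve_codeset : Prop := ∀ (vocab : List (String × Int)) (prefixes : List String), Dom_resolve_codeset vocab prefixes → Spec_resolve_codeset vocab prefixes (resolve_codeset vocab prefixes)

-- ===== LEMMAS AND PROOFS =====

lemma pvFirstMatchA_iff (tok : String) (prefixes : List String) :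
    pvFirstMatchA tok prefixes = true ↔ ∃ p ∈ prefixes, PySem.Str.startswith tok p = true := by
  induction prefixes with
  | nil => simp [pvFirstMatchA]
  | cons p ps ih =>
    simp only [pvFirstMatchA, List.mem_cons]
    split_ifs with h
    · exact iff_of_true rfl ⟨p, Or.inl rfl, h⟩
    · simp only [ih]
      constructor
      · rintro ⟨q, hq, hs⟩; exact ⟨q, Or.inr hq, hs⟩
      · rintro ⟨q, hq | hq, hs⟩
        · exact absurd (hq ▸ hs) h
        · exact ⟨q, hq, hs⟩

lemma pv_startswith_iff (tok p : String) :
    PySem.Str.startswith tok p = true ↔ p.toList <+: tok.toList := by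
  rw [PySem.Str.startswith_eq, PySem.Chars.startswith_iff]

lemma pv_slice_len (tok : String) (n : Nat) :
    PySem.Str.slice tok none (some (n : Int)) = String.ofList (tok.toList.take n) := by
  simp [PySem.Str.slice, PySem.Chars.slice_eq_listSlice,
    PySem.List.slice_to (b := (n : Int)) tok.toList (by positivity)]

lemma pvMatchB_eq (prefixes : List String) (tok : String) :
    pvMatchB (PySem.Set.ofList prefixes) (PySem.Set.ofList (prefixes.map PySem.Str.len)) tok
      = pvFirstMatchA tok prefixes := by
  rw [Bool.eq_iff_iff, pvFirstMatchA_iff, pvMatchB, List.any_eq_true]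
  constructor
  · rintro ⟨L, hL, hc⟩
    rw [PySem.Set.contains_iff, PySem.Set.mem_ofList] at hc
    refine ⟨_, hc, ?_⟩
    rw [PySem.Set.mem_ofList, List.mem_map] at hL
    obtain ⟨p, _, rfl⟩ := hL
    rw [pv_startswith_iff]
    have hlen : PySem.Str.len p = ((p.toList.length : Nat) : Int) := rfl
    rw [hlen, pv_slice_len] at hc ⊢
    rw [String.toList_ofList]
    exact List.take_prefix _ _
  · rintro ⟨p, hp, hs⟩
    rw [pv_startswith_iff, List.prefix_iff_eq_take] at hs
    refine ⟨PySem.Str.len p, ?_, ?_⟩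
    · rw [PySem.Set.mem_ofList]; exact List.mem_map_of_mem hp
    · rw [PySem.Set.contains_iff, PySem.Set.mem_ofList]
      have hlen : PySem.Str.len p = ((p.toList.length : Nat) : Int) := rfl
      rw [hlen, pv_slice_len, ← hs, String.ofList_toList]
      exact hp

-- ===== VERDICT (by name: the statement is the Claim_ definition above) =====
theorem resolve_codeset_spec : Claim_equal_resolve_codeset := by
  intro vocab prefixes _
  unfold Spec_resolve_codeset resolve_codeset resolve_codeset_alt
  rw [PySem.List.foldl_append_if (fun x => pvFirstMatchA x.1 prefixes) (fun x => x.2) vocab []]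
  simp only [List.nil_append, pvMatchB_eq]
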